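-- pv_equiv track=rewrite | github.com/geegl/DaMing1900 | scripts/build_context_pack.py | build_voice_rules_compact
-- ===== SOURCE A (Python) =====
-- def build_voice_rules_compact(full_text: str) -> str:
--     text = full_text.strip()
--     if len(text) <= 1100:
--         return "# 人物音色规则（精简）\n\n" + text
--     lines = [line for line in text.splitlines() if line.strip()]
--     compact_lines = []
--     bullet_count = 0
--     for line in lines:
--         if line.startswith("### ") or "对话风格" in line:
--             compact_lines.append(line)
--             bullet_count = 0
--             continue
--         if line.startswith("- ") and bullet_count < 2:
--             compact_lines.append(line)
--             bullet_count += 1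
--             continue
--     compact = "\n".join(compact_lines).strip()
--     return "# 人物音色规则（精简）\n\n" + compact[:1100].strip()
-- ===== SOURCE B (Python) =====
-- def build_voice_rules_compact(full_text: str) -> str:
--     text = full_text.strip()
--     if len(text) <= 1100:
--         return "# 人物音色规则（精简）\n\n" + text
--     lines = [line for line in text.splitlines() if line.strip()]
--     # Partition lines into sections: a new section starts at each header line
--     # (startswith '### ' or containing '对话风格'); lines before the first
--     # header form an implicit leading section.
--     groups = []
--     cur = []
--     for line in lines:
--         if line.startswith("### ") or "对话风格" in line:
--             groups.append(cur)
--             cur = [line]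
--         else:
--             cur.append(line)
--     groups.append(cur)
--     out = []
--     for g in groups:
--         if g and (g[0].startswith("### ") or "对话风格" in g[0]):
--             out.append(g[0])
--             body = g[1:]
--         else:
--             body = g
--         out.extend([l for l in body if l.startswith("- ")][:2])
--     compact = "\n".join(out).strip()
--     return "# 人物音色规则（精简）\n\n" + compact[:1100].strip()
-- ===== Notes on version B (the rewrite author's own statement) =====
-- stated objective: alternative
-- what changed: Replaces A's single pass with a mutable bullet counter by a two-stage decomposition: partition the non-blank lines into header-led sections, then emit each section's header plus the first two bullet lines of its body via filter-and-take.
import Mathlib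
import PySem

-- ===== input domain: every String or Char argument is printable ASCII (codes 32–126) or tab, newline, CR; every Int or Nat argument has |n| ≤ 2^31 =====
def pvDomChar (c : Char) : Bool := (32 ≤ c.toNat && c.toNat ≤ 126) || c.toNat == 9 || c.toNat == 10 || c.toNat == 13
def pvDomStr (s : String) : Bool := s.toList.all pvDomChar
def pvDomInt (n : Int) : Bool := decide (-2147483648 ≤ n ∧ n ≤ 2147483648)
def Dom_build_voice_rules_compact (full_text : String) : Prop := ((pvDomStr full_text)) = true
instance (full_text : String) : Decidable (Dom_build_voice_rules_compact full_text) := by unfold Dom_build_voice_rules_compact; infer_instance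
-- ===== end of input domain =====

-- B re-implements the long-text compaction by first partitioning the non-blank lines
-- into header-led sections and then emitting each section's header plus its first two
-- bullets, instead of A's single pass with a mutable bullet counter (objective: alternative).

-- shared predicates (both Pythons write these conditions inline, identically)
def pvHdr (l : List Char) : Bool :=
  PySem.Chars.startswith l "### ".toList || PySem.Chars.isIn "对话风格".toList l

def pvBullet (l : List Char) : Bool := PySem.Chars.startswith l "- ".toList

-- ===== PORT A =====
-- A's loop state: (compact_lines, bullet_count)
def pvStepA (st : List (List Char) × Nat) (line : List Char) : List (List Char) × Nat :=
  if pvHdr line then (st.1 ++ [line], 0)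
  else if pvBullet line ∧ st.2 < 2 then (st.1 ++ [line], st.2 + 1)
  else st

def build_voice_rules_compact (full_text : String) : String :=
  let text := PySem.Chars.strip full_text.toList
  if text.length ≤ 1100 then
    String.ofList ("# 人物音色规则（精简）\n\n".toList ++ text)
  else
    let lines := (PySem.Chars.splitlines text).filter (fun l => PySem.Chars.strip l != [])
    let compact_lines := (lines.foldl pvStepA ([], 0)).1
    let compact := PySem.Chars.strip (PySem.Chars.join "\n".toList compact_lines)
    String.ofList ("# 人物音色规则（精简）\n\n".toList ++
      PySem.Chars.strip (PySem.Chars.slice compact none (some 1100)))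

-- ===== PORT B =====
-- B's first loop state: (finished groups, current group)
def pvStepB (st : List (List (List Char)) × List (List Char)) (line : List Char) :
    List (List (List Char)) × List (List Char) :=
  if pvHdr line then (st.1 ++ [st.2], [line]) else (st.1, st.2 ++ [line])

-- B's per-group emission: optional header, then the group's first two bullets
def pvEmit (g : List (List Char)) : List (List Char) :=
  match g with
  | [] => []
  | h :: t =>
    if pvHdr h then h :: (t.filter pvBullet).take 2
    else ((h :: t).filter pvBullet).take 2

def build_voice_rules_compact_alt (full_text : String) : String :=
  let text := PySem.Chars.strip full_text.toList
  if text.length ≤ 1100 then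
    String.ofList ("# 人物音色规则（精简）\n\n".toList ++ text)
  else
    let lines := (PySem.Chars.splitlines text).filter (fun l => PySem.Chars.strip l != [])
    let p := lines.foldl pvStepB ([], [])
    let groups := p.1 ++ [p.2]
    let out := groups.foldl (fun acc g => acc ++ pvEmit g) []
    let compact := PySem.Chars.strip (PySem.Chars.join "\n".toList out)
    String.ofList ("# 人物音色规则（精简）\n\n".toList ++
      PySem.Chars.strip (PySem.Chars.slice compact none (some 1100)))

-- ===== PRECONDITION & SPEC =====
def Spec_build_voice_rules_compact (full_text : String) (out : String) : Prop := out = build_voice_rules_compact_alt full_text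
instance (full_text : String) (out : String) : Decidable (Spec_build_voice_rules_compact full_text out) := by unfold Spec_build_voice_rules_compact; infer_instance

-- ===== CLAIM (what is proved, stated in full; the proofs are below) =====
def Claim_equal_build_voice_rules_compact : Prop := ∀ (full_text : String), Dom_build_voice_rules_compact full_text → Spec_build_voice_rules_compact full_text (build_voice_rules_compact full_text)

-- ===== LEMMAS AND PROOFS =====

-- the non-header part of a group (the lines whose bullets are counted)
def pvBody (g : List (List Char)) : List (List Char) :=
  match g with
  | [] => []
  | h :: t => if pvHdr h then t else h :: t

-- header part of a group
def pvHdrPart (g : List (List Char)) : List (List Char) :=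
  match g with
  | [] => []
  | h :: _ => if pvHdr h then [h] else []

theorem pvEmit_eq (g : List (List Char)) :
    pvEmit g = pvHdrPart g ++ ((pvBody g).filter pvBullet).take 2 := by
  cases g with
  | nil => rfl
  | cons h t =>
    simp only [pvEmit, pvHdrPart, pvBody]
    split_ifs <;> simp

theorem pvBody_append (cur : List (List Char)) (l : List Char) (hl : pvHdr l = false) :
    pvBody (cur ++ [l]) = pvBody cur ++ [l] := by
  cases cur with
  | nil => simp [pvBody, hl]
  | cons h t => simp only [pvBody, List.cons_append]; split_ifs <;> simp

theorem pvHdrPart_append (cur : List (List Char)) (l : List Char) (hl : pvHdr l = false) :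
    pvHdrPart (cur ++ [l]) = pvHdrPart cur := by
  cases cur with
  | nil => simp [pvHdrPart, hl]
  | cons h t => simp [pvHdrPart]

-- the key invariant: A's counter loop equals B's group-then-emit decomposition
theorem pvKey (lines : List (List Char)) :
    ∀ (acc : List (List Char)) (gs : List (List (List Char))) (cur : List (List Char)),
    (lines.foldl pvStepA
        (acc ++ gs.flatMap pvEmit ++ pvEmit cur,
         min 2 ((pvBody cur).countP pvBullet))).1
      = acc ++ (lines.foldl pvStepB (gs, cur)).1.flatMap pvEmit
            ++ pvEmit (lines.foldl pvStepB (gs, cur)).2 := by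
  induction lines with
  | nil => intro acc gs cur; simp
  | cons l rest ih =>
    intro acc gs cur
    by_cases hl : pvHdr l = true
    · -- header line: A appends it and resets; B flushes cur and starts a new group
      have hA : pvStepA (acc ++ gs.flatMap pvEmit ++ pvEmit cur,
          min 2 ((pvBody cur).countP pvBullet)) l
          = (acc ++ (gs ++ [cur]).flatMap pvEmit ++ pvEmit [l],
             min 2 ((pvBody [l]).countP pvBullet)) := by
        simp [pvStepA, hl, pvEmit, pvBody]
      have hB : pvStepB (gs, cur) l = (gs ++ [cur], [l]) := by simp [pvStepB, hl]
      simp only [List.foldl_cons, hA, hB]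
      exact ih acc (gs ++ [cur]) [l]
    · have hl' : pvHdr l = false := by simpa using hl
      set c := (pvBody cur).countP pvBullet with hc
      have hcount : (pvBody (cur ++ [l])).countP pvBullet
          = c + (if pvBullet l then 1 else 0) := by
        rw [pvBody_append cur l hl']
        simp [List.countP_append, hc]
      have hfb : ((pvBody cur).filter pvBullet).length = c := by
        rw [hc]; exact Eq.symm List.countP_eq_length_filter
      by_cases hb : pvBullet l = true
      · have hcount' : (pvBody (cur ++ [l])).countP pvBullet = c + 1 := by
          rw [hcount, hb]; simp
        have hfil : (pvBody cur ++ [l]).filter pvBullet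
            = (pvBody cur).filter pvBullet ++ [l] := by simp [hb]
        by_cases hlt : c < 2
        · -- bullet within budget: both sides append l to the current section
          have hemit : pvEmit (cur ++ [l]) = pvEmit cur ++ [l] := by
            rw [pvEmit_eq, pvEmit_eq, pvHdrPart_append cur l hl',
                pvBody_append cur l hl', hfil,
                List.take_of_length_le (by simp [hfb]; omega),
                List.take_of_length_le (by simp [hfb]; omega), List.append_assoc]
          have h1 : min 2 c = c := by omega
          have h2 : min 2 (c + 1) = c + 1 := by omega
          have hA : pvStepA (acc ++ gs.flatMap pvEmit ++ pvEmit cur, min 2 c) l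
              = (acc ++ gs.flatMap pvEmit ++ pvEmit (cur ++ [l]),
                 min 2 ((pvBody (cur ++ [l])).countP pvBullet)) := by
            rw [hcount', h1, h2]
            simp [pvStepA, hl', hb, hlt, hemit]
          have hB : pvStepB (gs, cur) l = (gs, cur ++ [l]) := by simp [pvStepB, hl']
          simp only [List.foldl_cons, hA, hB]
          exact ih acc gs (cur ++ [l])
        · -- bullet over budget: A skips it; B's take 2 ignores it
          have hemit : pvEmit (cur ++ [l]) = pvEmit cur := by
            rw [pvEmit_eq, pvEmit_eq, pvHdrPart_append cur l hl',
                pvBody_append cur l hl', hfil,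
                List.take_append_of_le_length (by rw [hfb]; omega)]
          have h1 : min 2 c = 2 := by omega
          have h2 : min 2 (c + 1) = 2 := by omega
          have hA : pvStepA (acc ++ gs.flatMap pvEmit ++ pvEmit cur, min 2 c) l
              = (acc ++ gs.flatMap pvEmit ++ pvEmit (cur ++ [l]),
                 min 2 ((pvBody (cur ++ [l])).countP pvBullet)) := by
            rw [hcount', h1, h2]
            simp [pvStepA, hl', hb, hemit]
          have hB : pvStepB (gs, cur) l = (gs, cur ++ [l]) := by simp [pvStepB, hl']
          simp only [List.foldl_cons, hA, hB]
          exact ih acc gs (cur ++ [l])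
      · -- plain line: dropped by A, and contributes nothing to B's emission
        have hb' : pvBullet l = false := by simpa using hb
        have hemit : pvEmit (cur ++ [l]) = pvEmit cur := by
          rw [pvEmit_eq, pvEmit_eq, pvHdrPart_append cur l hl',
              pvBody_append cur l hl']
          simp [hb']
        have hcount' : (pvBody (cur ++ [l])).countP pvBullet = c := by
          rw [hcount, hb']; simp
        have hA : pvStepA (acc ++ gs.flatMap pvEmit ++ pvEmit cur, min 2 c) l
            = (acc ++ gs.flatMap pvEmit ++ pvEmit (cur ++ [l]),
               min 2 ((pvBody (cur ++ [l])).countP pvBullet)) := by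
          rw [hcount']
          simp [pvStepA, hl', hb', hemit]
        have hB : pvStepB (gs, cur) l = (gs, cur ++ [l]) := by simp [pvStepB, hl']
        simp only [List.foldl_cons, hA, hB]
        exact ih acc gs (cur ++ [l])

theorem pvCompactEq (lines : List (List Char)) :
    (lines.foldl pvStepA ([], 0)).1
      = ((lines.foldl pvStepB ([], [])).1 ++ [(lines.foldl pvStepB ([], [])).2]).foldl
          (fun acc g => acc ++ pvEmit g) [] := by
  have h := pvKey lines [] [] []
  have e0 : pvEmit [] = ([] : List (List Char)) := rfl
  have b0 : pvBody [] = ([] : List (List Char)) := rfl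
  rw [e0, b0] at h
  simp only [List.flatMap_nil, List.countP_nil, List.append_nil,
    List.nil_append, Nat.min_zero] at h
  rw [h, PySem.List.foldl_append_eq_flatMap]
  simp [List.flatMap_append]

-- ===== VERDICT (by name: the statement is the Claim_ definition above) =====
theorem build_voice_rules_compact_spec : Claim_equal_build_voice_rules_compact := by
  intro full_text _
  unfold Spec_build_voice_rules_compact build_voice_rules_compact build_voice_rules_compact_alt
  by_cases h : (PySem.Chars.strip full_text.toList).length ≤ 1100
  · simp [h]
  · simp only [h, if_false]
    rw [pvCompactEq]
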